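-- pv_equiv track=rewrite | github.com/gojay666/Trae31 | project/process_request_info.py | parse_request_info
-- ===== SOURCE A (Python) =====
-- def parse_request_info(request_str):
--     """解析请求头信息为字典"""
--     headers = {}
--     lines = request_str.strip().split('\n')
--
--     # 遍历所有行，两两配对组成键值对
--     i = 0
--     while i < len(lines):
--         if i + 1 < len(lines):
--             key = lines[i].strip()
--             value = lines[i + 1].strip()
--             headers[key] = value
--             i += 2
--         else:
--             # 如果行数为奇数，处理最后一行
--             key = lines[i].strip()
--             headers[key] = ""
--             i += 1
--
--     return headers
-- ===== SOURCE B (Python) =====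
-- def parse_request_info(request_str):
--     """解析请求头信息为字典"""
--     lines = [line.strip() for line in request_str.strip().split('\n')]
--     return dict(zip(lines[0::2], lines[1::2] + [""]))
-- ===== Notes on version B (the rewrite author's own statement) =====
-- stated objective: idiomatic
-- what changed: Replaces A's index-driven while loop with manual pairing and an odd-tail branch by one declarative expression: strip all lines, zip the even-index slice with the odd-index slice padded by an empty value, and build the dict from the pairs.
import Mathlib
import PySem

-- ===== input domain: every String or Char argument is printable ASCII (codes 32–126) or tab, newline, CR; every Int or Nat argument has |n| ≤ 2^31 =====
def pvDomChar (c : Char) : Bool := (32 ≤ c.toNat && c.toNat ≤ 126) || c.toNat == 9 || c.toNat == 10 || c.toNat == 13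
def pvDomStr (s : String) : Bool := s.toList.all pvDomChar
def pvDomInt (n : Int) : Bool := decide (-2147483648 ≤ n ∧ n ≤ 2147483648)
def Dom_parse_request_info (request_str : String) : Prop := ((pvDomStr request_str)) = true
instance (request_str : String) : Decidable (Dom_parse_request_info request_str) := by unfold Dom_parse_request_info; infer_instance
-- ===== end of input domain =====

-- B replaces A's index-driven while loop by zipping the even-index and odd-index slices
-- (with a padding "" value for an odd trailing line) into a dict: simpler, same cost.

-- ===== PORT A =====
-- the while loop of A: consume lines two at a time, inserting stripped key/value;
-- a single leftover line becomes a key with value "".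
def pvLoopA (d : PySem.Dict String String) : List String → PySem.Dict String String
  | [] => d
  | [k] => d.insert (PySem.Str.strip k) ""
  | k :: v :: rest => pvLoopA (d.insert (PySem.Str.strip k) (PySem.Str.strip v)) rest

def parse_request_info (request_str : String) : List (String × String) :=
  let lines := (PySem.Str.split? (PySem.Str.strip request_str) "\n").getD []
  (pvLoopA PySem.Dict.empty lines).items

-- ===== PORT B =====
def parse_request_info_alt (request_str : String) : List (String × String) :=
  let lines := ((PySem.Str.split? (PySem.Str.strip request_str) "\n").getD []).map PySem.Str.strip
  (PySem.Dict.ofList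
    (((PySem.List.slice? lines (some 0) none 2).getD []).zip
     (((PySem.List.slice? lines (some 1) none 2).getD []) ++ [""]))).items

-- ===== PRECONDITION & SPEC =====
def Spec_parse_request_info (request_str : String) (out : List (String × String)) : Prop := out = parse_request_info_alt request_str
instance (request_str : String) (out : List (String × String)) : Decidable (Spec_parse_request_info request_str out) := by unfold Spec_parse_request_info; infer_instance

-- ===== CLAIM (what is proved, stated in full; the proofs are below) =====
def Claim_equal_parse_request_info : Prop := ∀ (request_str : String), Dom_parse_request_info request_str → Spec_parse_request_info request_str (parse_request_info request_str)

-- ===== LEMMAS AND PROOFS =====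

/-- even-index elements xs[0::2] -/
def pvEvens {α : Type} : List α → List α
  | [] => []
  | [x] => [x]
  | x :: _ :: r => x :: pvEvens r

/-- odd-index elements xs[1::2] -/
def pvOdds {α : Type} : List α → List α
  | [] => []
  | [_] => []
  | _ :: y :: r => y :: pvOdds r

theorem pvAux0 {α : Type} : ∀ (xs : List α),
    List.filterMap (fun k => xs[2 * k]?) (List.range ((xs.length + 1) / 2)) = pvEvens xs
  | [] => by simp [pvEvens]
  | [x] => by simp [List.range_succ, pvEvens]
  | x :: y :: r => by
    have hlen : ((x :: y :: r).length + 1) / 2 = (r.length + 1) / 2 + 1 := by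
      simp [List.length_cons]; omega
    rw [hlen, List.range_succ_eq_map, List.filterMap_cons, List.filterMap_map]
    have h0 : (x :: y :: r)[2 * 0]? = some x := rfl
    rw [h0]
    have hcongr : List.filterMap ((fun k => (x :: y :: r)[2 * k]?) ∘ Nat.succ)
        (List.range ((r.length + 1) / 2)) =
        List.filterMap (fun k => r[2 * k]?) (List.range ((r.length + 1) / 2)) := by
      apply List.filterMap_congr
      intro k _
      have : 2 * Nat.succ k = 2 * k + 1 + 1 := by omega
      simp [Function.comp, this]
    rw [hcongr, pvAux0 r]
    simp [pvEvens]

theorem pvAux1 {α : Type} : ∀ (xs : List α),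
    List.filterMap (fun k => xs[2 * k + 1]?) (List.range (xs.length / 2)) = pvOdds xs
  | [] => by simp [pvOdds]
  | [x] => by simp [pvOdds]
  | x :: y :: r => by
    have hlen : (x :: y :: r).length / 2 = r.length / 2 + 1 := by
      simp [List.length_cons]; omega
    rw [hlen, List.range_succ_eq_map, List.filterMap_cons, List.filterMap_map]
    have h0 : (x :: y :: r)[2 * 0 + 1]? = some y := rfl
    rw [h0]
    have hcongr : List.filterMap ((fun k => (x :: y :: r)[2 * k + 1]?) ∘ Nat.succ)
        (List.range (r.length / 2)) =
        List.filterMap (fun k => r[2 * k + 1]?) (List.range (r.length / 2)) := by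
      apply List.filterMap_congr
      intro k _
      have : 2 * Nat.succ k + 1 = 2 * k + 1 + 1 + 1 := by omega
      simp [Function.comp, this]
    rw [hcongr, pvAux1 r]
    simp [pvOdds]

theorem pvSlice0 {α : Type} (xs : List α) :
    PySem.List.slice? xs (some 0) none 2 = some (pvEvens xs) := by
  rw [PySem.List.slice?, PySem.List.sliceIndices]
  simp only [if_neg (by norm_num : ¬ (2:ℤ) = 0)]
  have hs : ¬ ((2:ℤ) < 0) := by norm_num
  simp only [if_neg hs, if_pos (by norm_num : (0:ℤ) < 2)]
  have hstart : (if (0:ℤ) < 0 then max (0 + (xs.length:ℤ)) 0 else min 0 (xs.length:ℤ)) = 0 := by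
    simp
  rw [hstart]
  have hcount : (if (0:ℤ) < (xs.length:ℤ) then (((xs.length:ℤ) - 0 + 2 - 1) / 2).toNat else 0)
      = (xs.length + 1) / 2 := by
    by_cases h : (0:ℤ) < (xs.length:ℤ)
    · rw [if_pos h]; omega
    · rw [if_neg h]; omega
  rw [hcount]
  congr 1
  rw [← pvAux0 xs]
  apply List.filterMap_congr
  intro k _
  have : ((0:ℤ) + 2 * (k:ℤ)).toNat = 2 * k := by omega
  rw [this]

theorem pvSlice1 {α : Type} (xs : List α) :
    PySem.List.slice? xs (some 1) none 2 = some (pvOdds xs) := by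
  cases xs with
  | nil => rfl
  | cons x r =>
    rw [PySem.List.slice?, PySem.List.sliceIndices]
    simp only [if_neg (by norm_num : ¬ (2:ℤ) = 0)]
    have hs : ¬ ((2:ℤ) < 0) := by norm_num
    simp only [if_neg hs, if_pos (by norm_num : (0:ℤ) < 2)]
    have hn : (1:ℤ) ≤ ((x :: r).length : ℤ) := by simp
    have hstart : (if (1:ℤ) < 0 then max (1 + ((x :: r).length:ℤ)) 0
        else min 1 ((x :: r).length:ℤ)) = 1 := by
      rw [if_neg (by norm_num : ¬ (1:ℤ) < 0)]
      omega
    rw [hstart]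
    have hcount : (if (1:ℤ) < ((x :: r).length:ℤ)
        then ((((x :: r).length:ℤ) - 1 + 2 - 1) / 2).toNat else 0) = (x :: r).length / 2 := by
      by_cases h : (1:ℤ) < ((x :: r).length:ℤ)
      · rw [if_pos h]; simp only [List.length_cons] at h ⊢; omega
      · rw [if_neg h]; simp only [List.length_cons] at h ⊢; omega
    rw [hcount]
    congr 1
    rw [← pvAux1 (x :: r)]
    apply List.filterMap_congr
    intro k _
    have : ((1:ℤ) + 2 * (k:ℤ)).toNat = 2 * k + 1 := by omega
    rw [this]

theorem pvLoopA_eq : ∀ (ls : List String) (d : PySem.Dict String String),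
    pvLoopA d ls =
      d.update ((pvEvens (ls.map PySem.Str.strip)).zip (pvOdds (ls.map PySem.Str.strip) ++ [""]))
  | [], d => rfl
  | [k], d => rfl
  | k :: v :: r, d => by
    simp only [List.map_cons, pvEvens, pvOdds, List.cons_append, List.zip_cons_cons]
    exact pvLoopA_eq r (d.insert (PySem.Str.strip k) (PySem.Str.strip v))

-- ===== VERDICT (by name: the statement is the Claim_ definition above) =====
theorem parse_request_info_spec : Claim_equal_parse_request_info := by
  intro s _
  unfold Spec_parse_request_info parse_request_info parse_request_info_alt
  simp only [pvSlice0, pvSlice1, Option.getD_some]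
  rw [pvLoopA_eq]
  rfl
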